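-- pv_equiv track=rewrite | github.com/komorikoki/Distillation-llms | TrainSum/SQuAD/eval.py | answer
-- ===== SOURCE A (Python) =====
-- def answer(label):
--     start = 0
--     end = 0
--     tmp = False
--     for i in range(len(label)):
--         if label[i] == 362:
--             start=i
--             tmp = True
--         if label[i] == 128001 and tmp:
--             end = i
--             break
--
--     return [start, end]
-- ===== SOURCE B (Python) =====
-- def answer(label):
--     if 362 not in label:
--         return [0, 0]
--     f = label.index(362)
--     tail = label[f + 1:]
--     if 128001 in tail:
--         k = tail.index(128001)
--         end = f + 1 + k
--         seg = tail[:k]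
--     else:
--         end = 0
--         seg = tail
--     start = f
--     for j in range(len(seg) - 1, -1, -1):
--         if seg[j] == 362:
--             start = f + 1 + j
--             break
--     return [start, end]
-- ===== Notes on version B (the rewrite author's own statement) =====
-- stated objective: alternative
-- what changed: Replaces A's single stateful per-element forward pass with break by boundary finding via list.index and slicing (first 362, first following 128001) plus a separate backward scan for the last 362 before that boundary.
import Mathlib
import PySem

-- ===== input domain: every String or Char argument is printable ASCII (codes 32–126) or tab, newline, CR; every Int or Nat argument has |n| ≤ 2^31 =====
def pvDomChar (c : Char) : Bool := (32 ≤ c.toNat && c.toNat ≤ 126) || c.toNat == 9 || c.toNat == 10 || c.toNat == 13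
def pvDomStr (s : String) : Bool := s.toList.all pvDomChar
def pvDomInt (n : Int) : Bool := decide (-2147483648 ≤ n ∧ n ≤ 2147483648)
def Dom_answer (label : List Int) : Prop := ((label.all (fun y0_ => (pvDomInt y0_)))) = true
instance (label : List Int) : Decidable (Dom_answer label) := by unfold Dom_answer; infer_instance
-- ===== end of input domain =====

-- B replaces A's single stateful break-loop by boundary finding (first 362 via list.index,
-- first following 128001 via a slice + index) plus a separate backward scan for the last 362.

-- ===== PORT A =====
-- one pass, state (start, end, tmp), break at the first 128001 after a 362
def answerLoop : List Int → Int → Int → Int → Bool → Int × Int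
  | [], _, start, en, _ => (start, en)
  | x :: xs, i, start, en, tmp =>
    let start' := if x = 362 then i else start
    let tmp' := if x = 362 then true else tmp
    if x = 128001 ∧ tmp' = true then (start', i)
    else answerLoop xs (i + 1) start' en tmp'

def answer (label : List Int) : List Int :=
  let r := answerLoop label 0 0 0 false
  [r.1, r.2]

-- ===== PORT B =====
-- Source B's backward loop `for j in range(len(seg)-1,-1,-1): if seg[j]==362: start=f+1+j; break`,
-- rendered as recursion over seg.reverse carrying the running value f+1+j
def bLoop : List Int → Int → Int → Int
  | [], _, dflt => dflt
  | x :: xs, j, dflt => if x = 362 then j else bLoop xs (j - 1) dflt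

def answer_alt (label : List Int) : List Int :=
  match PySem.List.index? label 362 with
  | none => [0, 0]
  | some f =>
    let tail := PySem.List.slice label (some ((f : Int) + 1)) none
    match PySem.List.index? tail 128001 with
    | none =>
      let seg := tail
      [bLoop seg.reverse ((f : Int) + 1 + ((seg.length : Int) - 1)) f, 0]
    | some k =>
      let seg := PySem.List.slice tail none (some (k : Int))
      [bLoop seg.reverse ((f : Int) + 1 + ((seg.length : Int) - 1)) f,
       (f : Int) + 1 + (k : Int)]

-- ===== PRECONDITION & SPEC =====
def Spec_answer (label : List Int) (out : List Int) : Prop := out = answer_alt label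
instance (label : List Int) (out : List Int) : Decidable (Spec_answer label out) := by unfold Spec_answer; infer_instance

-- ===== CLAIM (what is proved, stated in full; the proofs are below) =====
def Claim_equal_answer : Prop := ∀ (label : List Int), Dom_answer label → Spec_answer label (answer label)

-- ===== LEMMAS AND PROOFS =====

-- index (from the end) of the last 362 in a list
def l362 : List Int → Option Nat
  | [] => none
  | x :: xs =>
    match l362 xs with
    | some j => some (j + 1)
    | none => if x = 362 then some 0 else none

-- value of `start` after scanning xs (offset i) with current value s, in the tmp = true phase
def lastStart (xs : List Int) (i s : Int) : Int :=
  match l362 xs with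
  | none => s
  | some j => i + j

theorem lastStart_cons (x : Int) (xs : List Int) (i s : Int) :
    lastStart (x :: xs) i s = lastStart xs (i + 1) (if x = 362 then i else s) := by
  unfold lastStart
  rw [show l362 (x :: xs) = (match l362 xs with
      | some j => some (j + 1)
      | none => if x = 362 then some 0 else none) from rfl]
  cases h : l362 xs with
  | none => by_cases hx : x = 362 <;> simp [hx]
  | some j => simp; ring

theorem l362_append (ys : List Int) (x : Int) :
    l362 (ys ++ [x]) = if x = 362 then some ys.length else l362 ys := by
  induction ys with
  | nil => by_cases hx : x = 362 <;> simp [l362, hx]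
  | cons y ys ih =>
    rw [List.cons_append,
      show l362 (y :: (ys ++ [x])) = (match l362 (ys ++ [x]) with
        | some j => some (j + 1)
        | none => if y = 362 then some 0 else none) from rfl, ih]
    by_cases hx : x = 362
    · simp [hx]
    · simp only [if_neg hx]
      rfl

theorem answerLoop_true (xs : List Int) (i s : Int) :
    answerLoop xs i s 0 true =
      match xs.findIdx? (· == (128001 : Int)) with
      | none => (lastStart xs i s, 0)
      | some k => (lastStart (xs.take k) i s, i + k) := by
  induction xs generalizing i s with
  | nil => simp [answerLoop, lastStart, l362]
  | cons x xs ih =>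
    by_cases hx : x = 128001
    · subst hx
      simp [answerLoop, lastStart, l362, List.findIdx?_cons]
    · rw [show answerLoop (x :: xs) i s 0 true
            = answerLoop xs (i + 1) (if x = 362 then i else s) 0 true by
        simp [answerLoop, hx]]
      rw [ih, List.findIdx?_cons]
      simp only [show (x == (128001 : Int)) = false by simp [hx]]
      cases h : xs.findIdx? (· == (128001 : Int)) with
      | none => simp [lastStart_cons]
      | some k =>
        simp [Option.map_some, lastStart_cons]
        omega

theorem answerLoop_false (xs : List Int) (i s : Int) :
    answerLoop xs i s 0 false =
      match xs.findIdx? (· == (362 : Int)) with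
      | none => (s, 0)
      | some f => answerLoop (xs.drop (f + 1)) (i + f + 1) (i + f) 0 true := by
  induction xs generalizing i s with
  | nil => simp [answerLoop]
  | cons x xs ih =>
    by_cases hx : x = 362
    · subst hx
      simp [answerLoop, List.findIdx?_cons]
    · rw [show answerLoop (x :: xs) i s 0 false = answerLoop xs (i + 1) s 0 false by
        simp [answerLoop, hx]]
      rw [ih, List.findIdx?_cons]
      simp only [show (x == (362 : Int)) = false by simp [hx], Bool.false_eq_true, if_false]
      cases h : xs.findIdx? (· == (362 : Int)) with
      | none => simp
      | some f =>
        simp only [Option.map_some, List.drop_succ_cons]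
        have e1 : i + (((f + 1 : Nat) : Int)) + 1 = (i + 1) + (f : Int) + 1 := by push_cast; ring
        have e2 : i + (((f + 1 : Nat) : Int)) = (i + 1) + (f : Int) := by push_cast; ring
        rw [e1, e2]

theorem bLoop_spec (seg : List Int) (i s : Int) :
    bLoop seg.reverse (i + (seg.length : Int) - 1) s = lastStart seg i s := by
  induction seg using List.reverseRecOn with
  | nil => simp [bLoop, lastStart, l362]
  | append_singleton ys x ih =>
    rw [List.reverse_append]
    simp only [List.reverse_cons, List.reverse_nil, List.nil_append, List.singleton_append]
    unfold bLoop
    unfold lastStart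
    rw [l362_append]
    by_cases hx : x = 362
    · simp [hx]
      ring
    · simp only [if_neg hx]
      have e : i + ((ys ++ [x]).length : Int) - 1 - 1 = i + (ys.length : Int) - 1 := by
        simp; ring
      rw [e, ih]
      unfold lastStart
      rfl

theorem index?_eq_findIdx? (xs : List Int) (v : Int) :
    PySem.List.index? xs v = xs.findIdx? (· == v) := by
  rw [PySem.List.index?_eq_idxOf?]
  rfl

theorem findIdx?_lt_length {xs : List Int} {p : Int → Bool} {k : Nat}
    (h : xs.findIdx? p = some k) : k < xs.length :=
  List.findIdx?_eq_some_iff_findIdx_eq.mp h |>.1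

-- ===== VERDICT (by name: the statement is the Claim_ definition above) =====
theorem answer_spec : Claim_equal_answer := by
  intro label _
  show answer label = answer_alt label
  unfold answer answer_alt
  rw [index?_eq_findIdx?]
  rw [answerLoop_false]
  cases h1 : label.findIdx? (· == (362 : Int)) with
  | none => simp
  | some f =>
    simp only []
    rw [answerLoop_true]
    have hslice : PySem.List.slice label (some ((f : Int) + 1)) none = label.drop (f + 1) := by
      have : ((f : Int) + 1) = (((f + 1 : Nat) : Int)) := by push_cast; ring
      rw [this, PySem.List.slice_from_natCast]
    rw [index?_eq_findIdx?, hslice]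
    cases h2 : (label.drop (f + 1)).findIdx? (· == (128001 : Int)) with
    | none =>
      simp only []
      have := bLoop_spec (label.drop (f + 1)) ((f : Int) + 1) f
      rw [show (f : Int) + 1 + (((label.drop (f + 1)).length : Int) - 1)
            = (f : Int) + 1 + ((label.drop (f + 1)).length : Int) - 1 by ring, this]
      have e : (0 : Int) + (f : Int) + 1 = (f : Int) + 1 := by ring
      have e2 : (0 : Int) + (f : Int) = (f : Int) := by ring
      rw [e, e2]
    | some k =>
      simp only []
      have hk : k < (label.drop (f + 1)).length := findIdx?_lt_length h2
      have hseg : PySem.List.slice (label.drop (f + 1)) none (some (k : Int))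
          = (label.drop (f + 1)).take k := PySem.List.slice_to_natCast _ _
      rw [hseg]
      have hlen : ((label.drop (f + 1)).take k).length = k := by
        simp only [List.length_take, List.length_drop]
        simp only [List.length_drop] at hk
        omega
      rw [hlen]
      have := bLoop_spec ((label.drop (f + 1)).take k) ((f : Int) + 1) f
      rw [hlen] at this
      rw [show (f : Int) + 1 + ((k : Int) - 1) = (f : Int) + 1 + (k : Int) - 1 by ring, this]
      have e : (0 : Int) + (f : Int) + 1 = (f : Int) + 1 := by ring
      have e2 : (0 : Int) + (f : Int) = (f : Int) := by ring
      rw [e, e2]
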